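-- pv_equiv track=rewrite | github.com/VictorMorand/llm2ner | src/llm2ner/data.py | align_tags_with_tokens
-- ===== SOURCE A (Python) =====
-- def align_tags_with_tokens(tokens, tags):
--     """Word-level CoNLL tags to token-level with tokens from tokenizer, WITHOUT <bos> token, from
--     Args:
--         tokens: (seq) str tokens from tokenizer WITHOUT <bos> token
--         tags: (#words) word-level CoNLL tags
--     Return
--         token_tags (seq) token-level ConLL tags
--     """
--     token_tags = [tags[0]]
--     word_index = 0
--
--     for token in tokens[1:]:
--         if token.startswith(" "):  # or token.strip() in special_tokens:
--             # new word
--             word_index += 1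
--             if word_index >= len(tags):
--                 word_index = len(tags) - 1
--             token_tags.append(tags[word_index])
--         else:
--             # it is a subword, take previous ner tag
--             tag = token_tags[-1]
--             tag += tag % 2
--             # for CoNLL, following tags are +1, so add one to keep only first token even.
--             token_tags.append(tag)
--     return token_tags
-- ===== SOURCE B (Python) =====
-- def align_tags_with_tokens(tokens, tags):
--     """Two-pass variant: first compute each token's word index, then emit tags
--     from the word index directly (subword tag = tags[w] + tags[w] % 2, the
--     closed form of the running-accumulator adjustment)."""
--     token_tags = [tags[0]]
--     rest = tokens[1:]
--     word_ids = []
--     wi = 0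
--     for token in rest:
--         if token.startswith(" "):
--             wi = min(wi + 1, len(tags) - 1)
--         word_ids.append(wi)
--     for token, w in zip(rest, word_ids):
--         if token.startswith(" "):
--             token_tags.append(tags[w])
--         else:
--             token_tags.append(tags[w] + tags[w] % 2)
--     return token_tags
-- ===== Notes on version B (the rewrite author's own statement) =====
-- stated objective: alternative
-- what changed: Replaces the single loop whose subword branch depends on the previously emitted tag (token_tags[-1]) with two independent passes: one computing each token's word index, one emitting tags[w] (word start) or tags[w] + tags[w] % 2 (subword, the closed form of the running adjustment).
import Mathlib
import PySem

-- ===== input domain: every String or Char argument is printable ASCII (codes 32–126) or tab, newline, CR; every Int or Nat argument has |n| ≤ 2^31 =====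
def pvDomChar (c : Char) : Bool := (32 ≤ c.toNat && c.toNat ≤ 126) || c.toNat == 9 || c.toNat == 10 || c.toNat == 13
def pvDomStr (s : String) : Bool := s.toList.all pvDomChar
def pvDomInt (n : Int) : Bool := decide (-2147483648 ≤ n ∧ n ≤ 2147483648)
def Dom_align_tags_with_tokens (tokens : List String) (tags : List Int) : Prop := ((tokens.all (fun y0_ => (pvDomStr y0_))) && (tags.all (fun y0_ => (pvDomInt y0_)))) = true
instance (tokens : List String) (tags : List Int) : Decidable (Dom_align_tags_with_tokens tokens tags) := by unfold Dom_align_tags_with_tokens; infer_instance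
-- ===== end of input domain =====

-- B replaces A's running-accumulator subword adjustment with two independent passes
-- (word indices first, then a direct closed-form emission) — an alternative decomposition,
-- same cost; equal on all inputs with tags ≠ [].

-- ===== PORT A =====
-- loop body of A: word-start tokens advance and clamp the word index; subwords
-- re-emit the previously emitted tag plus its parity
def pvStepA (tags : List Int) (st : List Int × Int) (token : String) : List Int × Int :=
  if PySem.Str.startswith token " " then
    let wi := st.2 + 1
    let wi := if wi ≥ PySem.List.len tags then PySem.List.len tags - 1 else wi
    (st.1 ++ [PySem.List.pyGetD tags wi 0], wi)
  else
    let tag := PySem.List.pyGetD st.1 (-1) 0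
    let tag := tag + PySem.Int.mod tag 2
    (st.1 ++ [tag], st.2)

def align_tags_with_tokens (tokens : List String) (tags : List Int) : List Int :=
  ((PySem.List.slice tokens (some 1) none).foldl (pvStepA tags)
    ([PySem.List.pyGetD tags 0 0], 0)).1

-- ===== PORT B =====
-- first pass of B: build the word index of every token of tokens[1:]
def pvStepIds (tags : List Int) (st : List Int × Int) (token : String) : List Int × Int :=
  let wi := if PySem.Str.startswith token " " then min (st.2 + 1) (PySem.List.len tags - 1) else st.2
  (st.1 ++ [wi], wi)

-- second pass of B: emit the tag for a (token, word index) pair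
def pvEmit (tags : List Int) (p : String × Int) : Int :=
  if PySem.Str.startswith p.1 " " then PySem.List.pyGetD tags p.2 0
  else PySem.List.pyGetD tags p.2 0 + PySem.Int.mod (PySem.List.pyGetD tags p.2 0) 2

def align_tags_with_tokens_alt (tokens : List String) (tags : List Int) : List Int :=
  let rest := PySem.List.slice tokens (some 1) none
  let word_ids := (rest.foldl (pvStepIds tags) ([], 0)).1
  [PySem.List.pyGetD tags 0 0] ++ (rest.zip word_ids).map (pvEmit tags)

-- ===== PRECONDITION & SPEC =====
-- A (and B) index tags[0] unconditionally, so both raise IndexError on tags = []; excluded.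
def Pre_align_tags_with_tokens (tokens : List String) (tags : List Int) : Prop := tags ≠ []
instance (tokens : List String) (tags : List Int) : Decidable (Pre_align_tags_with_tokens tokens tags) := by unfold Pre_align_tags_with_tokens; infer_instance
def pvWitness_align_tags_with_tokens : List String × List Int := (["He", "llo", " wor", "ld"], [1, 2])

def Spec_align_tags_with_tokens (tokens : List String) (tags : List Int) (out : List Int) : Prop := out = align_tags_with_tokens_alt tokens tags
instance (tokens : List String) (tags : List Int) (out : List Int) : Decidable (Spec_align_tags_with_tokens tokens tags out) := by unfold Spec_align_tags_with_tokens; infer_instance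

-- ===== CLAIM (what is proved, stated in full; the proofs are below) =====
def Claim_equal_align_tags_with_tokens : Prop := ∀ (tokens : List String) (tags : List Int), Dom_align_tags_with_tokens tokens tags → Pre_align_tags_with_tokens tokens tags → Spec_align_tags_with_tokens tokens tags (align_tags_with_tokens tokens tags)

-- ===== LEMMAS AND PROOFS =====

-- the word-index sequence computed by B's first pass, as a structural recursion
def pvIds (tags : List Int) : List String → Int → List Int
  | [], _ => []
  | t :: ts, wi =>
    let wi' := if PySem.Str.startswith t " " then min (wi + 1) (PySem.List.len tags - 1) else wi
    wi' :: pvIds tags ts wi'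

lemma pvFoldl_stepIds (tags : List Int) :
    ∀ (rest : List String) (l : List Int) (wi : Int),
      (rest.foldl (pvStepIds tags) (l, wi)).1 = l ++ pvIds tags rest wi := by
  intro rest
  induction rest with
  | nil => intro l wi; simp [pvIds]
  | cons t ts ih =>
    intro l wi
    simp only [List.foldl_cons, pvStepIds, pvIds, ih]
    simp

lemma pvMod_add_mod_two (a : Int) : PySem.Int.mod (a + PySem.Int.mod a 2) 2 = 0 := by
  rw [PySem.Int.mod_eq_zero_iff_dvd]
  have h := PySem.Int.floordiv_mul_add_mod a 2
  have h0 : 0 ≤ PySem.Int.mod a 2 := PySem.Int.mod_nonneg a (by norm_num)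
  have h1 : PySem.Int.mod a 2 < 2 := PySem.Int.mod_lt a (by norm_num)
  omega

-- main invariant: A's fold emits exactly B's emission over the word-index sequence,
-- as long as the last emitted tag v is tags[wi] or tags[wi] + tags[wi] % 2
lemma pvLoopA_eq (tags : List Int) (hT : tags ≠ []) :
    ∀ (rest : List String) (pre : List Int) (v wi : Int),
      0 ≤ wi → wi < (tags.length : Int) →
      (v = PySem.List.pyGetD tags wi 0 ∨
       v = PySem.List.pyGetD tags wi 0 + PySem.Int.mod (PySem.List.pyGetD tags wi 0) 2) →
      (rest.foldl (pvStepA tags) (pre ++ [v], wi)).1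
        = (pre ++ [v]) ++ (rest.zip (pvIds tags rest wi)).map (pvEmit tags) := by
  intro rest
  induction rest with
  | nil => intro pre v wi _ _ _; simp [pvIds]
  | cons t ts ih =>
    intro pre v wi h0 h1 hv
    have hlen : (0 : Int) < (tags.length : Int) := by
      have := List.length_pos_iff.mpr hT; exact_mod_cast this
    by_cases hs : PySem.Str.startswith t " " = true
    · -- word-start token
      have hclamp : (if wi + 1 ≥ PySem.List.len tags then PySem.List.len tags - 1 else wi + 1)
          = min (wi + 1) (PySem.List.len tags - 1) := by
        simp only [PySem.List.len_eq]
        split_ifs with h <;> omega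
      simp only [List.foldl_cons, pvStepA, hs, if_true, hclamp, pvIds, List.zip_cons_cons,
        List.map_cons]
      rw [ih (pre ++ [v]) _ _ (by simp only [PySem.List.len_eq] at *; omega)
            (by simp only [PySem.List.len_eq] at *; omega) (Or.inl rfl)]
      simp only [pvEmit, hs, if_true]
      simp [List.append_assoc]
    · -- subword token
      rw [Bool.not_eq_true] at hs
      have hg : PySem.List.pyGetD (pre ++ [v]) (-1) 0 = v :=
        PySem.List.pyGetD_neg_one_append_singleton pre v 0
      have hv' : v + PySem.Int.mod v 2
          = PySem.List.pyGetD tags wi 0 + PySem.Int.mod (PySem.List.pyGetD tags wi 0) 2 := by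
        rcases hv with hv | hv
        · rw [hv]
        · rw [hv, pvMod_add_mod_two, add_zero]
      simp only [List.foldl_cons, pvStepA, hs, hg, pvIds, List.zip_cons_cons,
        List.map_cons, Bool.false_eq_true, if_false]
      rw [hv', ih (pre ++ [v]) _ _ h0 h1 (Or.inr rfl)]
      simp only [pvEmit, hs, Bool.false_eq_true, if_false]
      simp [List.append_assoc]

-- ===== VERDICT (by name: the statement is the Claim_ definition above) =====
theorem align_tags_with_tokens_spec : Claim_equal_align_tags_with_tokens := by
  intro tokens tags _ hpre
  unfold Spec_align_tags_with_tokens align_tags_with_tokens align_tags_with_tokens_alt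
  have hlen : (0 : Int) < (tags.length : Int) := by
    have := List.length_pos_iff.mpr hpre; exact_mod_cast this
  have hmain := pvLoopA_eq tags hpre (PySem.List.slice tokens (some 1) none)
    [] (PySem.List.pyGetD tags 0 0) 0 le_rfl hlen (Or.inl rfl)
  simp only [List.nil_append] at hmain
  rw [hmain]
  simp [pvFoldl_stepIds]
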